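-- pv_equiv track=rewrite | github.com/humblehuman369/dealscope | backend/app/services/regional_cost_service.py | _state_from_prefix
-- ===== SOURCE A (Python) =====
-- def _state_from_prefix(prefix: int) -> str | None:
--     ranges = [
--         (10, 14, "NY"),
--         (70, 89, "NJ"),
--         (60, 69, "CT"),
--         (10, 27, "MA"),
--         (15, 19, "PA"),
--         (206, 219, "MD"),
--         (220, 246, "VA"),
--         (200, 205, "DC"),
--         (320, 349, "FL"),
--         (300, 319, "GA"),
--         (270, 289, "NC"),
--         (290, 299, "SC"),
--         (370, 385, "TN"),
--         (350, 369, "AL"),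
--         (386, 397, "MS"),
--         (700, 714, "LA"),
--         (750, 799, "TX"),
--         (430, 458, "OH"),
--         (480, 499, "MI"),
--         (600, 629, "IL"),
--         (460, 479, "IN"),
--         (530, 549, "WI"),
--         (550, 567, "MN"),
--         (630, 658, "MO"),
--         (660, 679, "KS"),
--         (800, 816, "CO"),
--         (850, 865, "AZ"),
--         (889, 898, "NV"),
--         (840, 847, "UT"),
--         (970, 979, "OR"),
--         (980, 994, "WA"),
--         (900, 961, "CA"),
--         (967, 968, "HI"),
--     ]
--     for lo, hi, state in ranges:
--         if lo <= prefix <= hi: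
--             return state
--     return None
-- ===== SOURCE B (Python) =====
-- # Binary search over a precomputed sorted, disjoint interval table (first-match
-- # overlaps of the original list already resolved), instead of a linear scan.
-- _TABLE = [
--     (10, 14, "NY"), (15, 27, "MA"), (60, 69, "CT"), (70, 89, "NJ"),
--     (200, 205, "DC"), (206, 219, "MD"), (220, 246, "VA"), (270, 289, "NC"),
--     (290, 299, "SC"), (300, 319, "GA"), (320, 349, "FL"), (350, 369, "AL"),
--     (370, 385, "TN"), (386, 397, "MS"), (430, 458, "OH"), (460, 479, "IN"),
--     (480, 499, "MI"), (530, 549, "WI"), (550, 567, "MN"), (600, 629, "IL"),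
--     (630, 658, "MO"), (660, 679, "KS"), (700, 714, "LA"), (750, 799, "TX"),
--     (800, 816, "CO"), (840, 847, "UT"), (850, 865, "AZ"), (889, 898, "NV"),
--     (900, 961, "CA"), (967, 968, "HI"), (970, 979, "OR"), (980, 994, "WA"),
-- ]
--
-- def _state_from_prefix(prefix: int) -> str | None:
--     lo, hi = 0, len(_TABLE)
--     while lo < hi:
--         mid = (lo + hi) // 2
--         a, b, state = _TABLE[mid]
--         if prefix < a:
--             hi = mid
--         elif prefix > b:
--             lo = mid + 1
--         else:
--             return state
--     return None
-- ===== Notes on version B (the rewrite author's own statement) =====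
-- stated objective: alternative
-- what changed: Replaces the linear first-match scan of the overlapping range list with a binary search over a precomputed sorted, disjoint interval table in which the original first-match overlaps are already resolved.
import Mathlib
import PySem

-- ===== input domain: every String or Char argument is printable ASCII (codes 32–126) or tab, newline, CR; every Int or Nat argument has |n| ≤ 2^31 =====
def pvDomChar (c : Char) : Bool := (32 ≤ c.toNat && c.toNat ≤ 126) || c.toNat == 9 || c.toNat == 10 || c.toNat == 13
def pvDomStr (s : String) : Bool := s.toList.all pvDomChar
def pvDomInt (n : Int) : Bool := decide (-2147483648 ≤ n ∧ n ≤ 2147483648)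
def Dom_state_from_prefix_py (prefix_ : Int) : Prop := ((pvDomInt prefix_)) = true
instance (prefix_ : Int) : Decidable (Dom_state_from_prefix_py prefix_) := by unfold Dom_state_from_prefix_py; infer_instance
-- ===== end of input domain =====

-- B replaces A's linear first-match scan of overlapping ranges with a binary search
-- over a precomputed sorted, disjoint interval table (alternative algorithm).

-- ===== PORT A =====
def pvRangesA : List (Int × Int × String) :=
  [(10, 14, "NY"), (70, 89, "NJ"), (60, 69, "CT"), (10, 27, "MA"), (15, 19, "PA"),
   (206, 219, "MD"), (220, 246, "VA"), (200, 205, "DC"), (320, 349, "FL"),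
   (300, 319, "GA"), (270, 289, "NC"), (290, 299, "SC"), (370, 385, "TN"),
   (350, 369, "AL"), (386, 397, "MS"), (700, 714, "LA"), (750, 799, "TX"),
   (430, 458, "OH"), (480, 499, "MI"), (600, 629, "IL"), (460, 479, "IN"),
   (530, 549, "WI"), (550, 567, "MN"), (630, 658, "MO"), (660, 679, "KS"),
   (800, 816, "CO"), (850, 865, "AZ"), (889, 898, "NV"), (840, 847, "UT"),
   (970, 979, "OR"), (980, 994, "WA"), (900, 961, "CA"), (967, 968, "HI")]
def pvScanA (prefix_ : Int) : List (Int × Int × String) → Option String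
  | [] => none
  | (lo, hi, state) :: rest =>
      if lo ≤ prefix_ ∧ prefix_ ≤ hi then some state else pvScanA prefix_ rest
def state_from_prefix_py (prefix_ : Int) : Option String :=
  pvScanA prefix_ pvRangesA
-- ===== PORT B =====
-- B's precomputed sorted disjoint table (overlaps of A's list already resolved)
def pvTableB : List (Int × Int × String) :=
  [(10, 14, "NY"), (15, 27, "MA"), (60, 69, "CT"), (70, 89, "NJ"),
   (200, 205, "DC"), (206, 219, "MD"), (220, 246, "VA"), (270, 289, "NC"),
   (290, 299, "SC"), (300, 319, "GA"), (320, 349, "FL"), (350, 369, "AL"),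
   (370, 385, "TN"), (386, 397, "MS"), (430, 458, "OH"), (460, 479, "IN"),
   (480, 499, "MI"), (530, 549, "WI"), (550, 567, "MN"), (600, 629, "IL"),
   (630, 658, "MO"), (660, 679, "KS"), (700, 714, "LA"), (750, 799, "TX"),
   (800, 816, "CO"), (840, 847, "UT"), (850, 865, "AZ"), (889, 898, "NV"),
   (900, 961, "CA"), (967, 968, "HI"), (970, 979, "OR"), (980, 994, "WA")]
-- fuel-structural form of B's while-loop (fuel ≥ hi - lo suffices; the loop
-- halves the range each step, so fuel = table length is ample)
def pvBSearchB (prefix_ : Int) : Nat → Nat → Nat → Option String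
  | 0, _, _ => none
  | fuel + 1, lo, hi =>
    if lo < hi then
      match pvTableB.getD ((lo + hi) / 2) (0, 0, "") with
      | (a, b, state) =>
        if prefix_ < a then pvBSearchB prefix_ fuel lo ((lo + hi) / 2)
        else if prefix_ > b then pvBSearchB prefix_ fuel ((lo + hi) / 2 + 1) hi
        else some state
    else none
def state_from_prefix_py_alt (prefix_ : Int) : Option String :=
  pvBSearchB prefix_ pvTableB.length 0 pvTableB.length



-- ===== PRECONDITION & SPEC =====
def Spec_state_from_prefix_py (prefix_ : Int) (out : Option String) : Prop := out = state_from_prefix_py_alt prefix_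
instance (prefix_ : Int) (out : Option String) : Decidable (Spec_state_from_prefix_py prefix_ out) := by unfold Spec_state_from_prefix_py; infer_instance

-- ===== CLAIM (what is proved, stated in full; the proofs are below) =====
def Claim_equal_state_from_prefix_py : Prop := ∀ (prefix_ : Int), Dom_state_from_prefix_py prefix_ → Spec_state_from_prefix_py prefix_ (state_from_prefix_py prefix_)

-- ===== LEMMAS AND PROOFS =====
theorem pv_entry_bounds : ∀ m : Nat, m < 32 →
    10 ≤ (pvTableB.getD m (0,0,"")).1 ∧ (pvTableB.getD m (0,0,"")).1 ≤ (pvTableB.getD m (0,0,"")).2.1 ∧ (pvTableB.getD m (0,0,"")).2.1 ≤ 994 := by decide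

theorem pv_bs_out (p : Int) (hp : p < 10 ∨ 994 < p) :
    ∀ n lo hi : Nat, hi ≤ 32 → pvBSearchB p n lo hi = none := by
  intro n
  induction n with
  | zero => intro lo hi h2; rfl
  | succ k ih =>
      intro lo hi h2
      rw [pvBSearchB]
      by_cases hlt : lo < hi
      · simp only [if_pos hlt]
        have hb := pv_entry_bounds ((lo+hi)/2) (by omega)
        rcases hE : pvTableB.getD ((lo+hi)/2) (0,0,"") with ⟨a, b, s⟩
        rw [hE] at hb
        simp only at hb ⊢
        rcases hp with hp | hp
        · rw [if_pos (by omega)]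
          exact ih lo ((lo+hi)/2) (by omega)
        · rw [if_neg (by omega), if_pos (by omega)]
          exact ih ((lo+hi)/2 + 1) hi (by omega)
      · exact if_neg hlt

set_option maxRecDepth 40000 in
set_option maxHeartbeats 2000000 in
theorem pv_mid : ((List.range 985).all (fun k =>
    state_from_prefix_py (10 + (k:Int)) == state_from_prefix_py_alt (10 + (k:Int)))) = true := by decide

theorem pv_main (p : Int) : state_from_prefix_py p = state_from_prefix_py_alt p := by
  by_cases hlo : p < 10
  · have hB := pv_bs_out p (Or.inl hlo) 32 0 32 (by omega)
    have hA : state_from_prefix_py p = none := by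
      unfold state_from_prefix_py pvRangesA
      simp only [pvScanA]
      repeat rw [if_neg (by omega)]
    rw [hA]; unfold state_from_prefix_py_alt pvTableB; rw [show ([(10, 14, "NY"), (15, 27, "MA"), (60, 69, "CT"), (70, 89, "NJ"),
      (200, 205, "DC"), (206, 219, "MD"), (220, 246, "VA"), (270, 289, "NC"),
      (290, 299, "SC"), (300, 319, "GA"), (320, 349, "FL"), (350, 369, "AL"),
      (370, 385, "TN"), (386, 397, "MS"), (430, 458, "OH"), (460, 479, "IN"),
      (480, 499, "MI"), (530, 549, "WI"), (550, 567, "MN"), (600, 629, "IL"),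
      (630, 658, "MO"), (660, 679, "KS"), (700, 714, "LA"), (750, 799, "TX"),
      (800, 816, "CO"), (840, 847, "UT"), (850, 865, "AZ"), (889, 898, "NV"),
      (900, 961, "CA"), (967, 968, "HI"), (970, 979, "OR"), (980, 994, "WA")] : List (Int × Int × String)).length = 32 from rfl]
    exact (hB).symm
  · by_cases hhi : 994 < p
    · have hB := pv_bs_out p (Or.inr hhi) 32 0 32 (by omega)
      have hA : state_from_prefix_py p = none := by
        unfold state_from_prefix_py pvRangesA
        simp only [pvScanA]
        repeat rw [if_neg (by omega)]
      rw [hA]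
      unfold state_from_prefix_py_alt
      rw [show pvTableB.length = 32 from rfl]
      exact hB.symm
    · have hk : ∃ k : Nat, k < 985 ∧ p = 10 + (k : Int) := ⟨(p - 10).toNat, by omega, by omega⟩
      obtain ⟨k, hk1, hk2⟩ := hk
      have := List.all_eq_true.mp pv_mid k (List.mem_range.mpr hk1)
      rw [hk2]
      exact eq_of_beq this

-- ===== VERDICT (by name: the statement is the Claim_ definition above) =====
theorem state_from_prefix_py_spec : Claim_equal_state_from_prefix_py := by
  intro p _
  unfold Spec_state_from_prefix_py
  exact pv_main p
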